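-- pv_equiv track=rewrite | github.com/stackwalnuts/walnut | plugins/alive/scripts/generate-index.py | yaml_escape
-- ===== SOURCE A (Python) =====
-- def yaml_escape(s):
--     """Escape a string for YAML output."""
--     if not s:
--         return '""'
--     s = str(s)
--     if any(c in s for c in ':{}[]&*#?|->!%@`,"\'\\'):
--         return '"' + s.replace('\\', '\\\\').replace('"', '\\"') + '"'
--     if s.startswith((' ', '-')) or s.endswith(' '):
--         return '"' + s + '"'
--     return s
-- ===== SOURCE B (Python) =====
-- SPECIAL = frozenset(':{}[]&*#?|->!%@`,"\'\\')
--
--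
-- def yaml_escape(s):
--     """Escape a string for YAML output (single pass over the characters)."""
--     if not s:
--         return '""'
--     s = str(s)
--     pieces = []
--     special = False
--     for c in s:
--         if c in SPECIAL:
--             special = True
--         if c == '\\':
--             pieces.append('\\\\')
--         elif c == '"':
--             pieces.append('\\"')
--         else:
--             pieces.append(c)
--     if special:
--         return '"' + ''.join(pieces) + '"'
--     if s[0] in ' -' or s[-1] == ' ':
--         return '"' + s + '"'
--     return s
-- ===== Notes on version B (the rewrite author's own statement) =====
-- stated objective: alternative
-- what changed: One pass over the string's characters that simultaneously detects special characters (set membership per character of s instead of scanning s once per special character) and builds the escaped text piece by piece, replacing both the any(c in s ...) scan and the chained .replace calls.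
import Mathlib
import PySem

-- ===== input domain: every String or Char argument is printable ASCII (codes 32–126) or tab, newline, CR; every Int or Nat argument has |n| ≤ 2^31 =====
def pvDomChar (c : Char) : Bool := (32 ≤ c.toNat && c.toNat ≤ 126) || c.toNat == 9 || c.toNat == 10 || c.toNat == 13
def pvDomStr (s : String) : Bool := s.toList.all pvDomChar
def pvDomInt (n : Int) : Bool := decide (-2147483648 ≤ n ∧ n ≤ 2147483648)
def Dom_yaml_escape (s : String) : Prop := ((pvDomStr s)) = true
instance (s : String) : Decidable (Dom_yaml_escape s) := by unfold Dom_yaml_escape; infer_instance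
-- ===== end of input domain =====

-- B replaces A's per-special-character scans and chained .replace passes by one single pass
-- over the string that both detects special characters and builds the escaped text (alternative).


-- ===== PORT A =====
def yaml_escape (s : String) : String :=
  if s = "" then "\"\""
  else if (":{}[]&*#?|->!%@`,\"'\\".toList).any (fun c => PySem.Str.isIn (String.ofList [c]) s) then
    "\"" ++ PySem.Str.replace (PySem.Str.replace s "\\" "\\\\") "\"" "\\\"" ++ "\""
  else if PySem.Str.startswith s " " || PySem.Str.startswith s "-" || PySem.Str.endswith s " " then
    "\"" ++ s ++ "\""
  else s

-- ===== PORT B =====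
-- the module-level frozenset SPECIAL of Source B
def pvSpecial : List Char := ":{}[]&*#?|->!%@`,\"'\\".toList

def yaml_escape_alt (s : String) : String :=
  if s = "" then "\"\""
  else
    let st := s.toList.foldl
      (fun (p : Bool × List String) c =>
        (p.1 || pvSpecial.contains c,
         p.2 ++ [if c = '\\' then "\\\\" else if c = '"' then "\\\"" else String.ofList [c]]))
      (false, [])
    if st.1 then "\"" ++ PySem.Str.join "" st.2 ++ "\""
    else if ((PySem.Str.pyGet? s 0).elim false (fun c => (" -".toList).contains c))
          || ((PySem.Str.pyGet? s (-1)).elim false (fun c => c == ' ')) then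
      "\"" ++ s ++ "\""
    else s

-- ===== PRECONDITION & SPEC =====
def Spec_yaml_escape (s : String) (out : String) : Prop := out = yaml_escape_alt s
instance (s : String) (out : String) : Decidable (Spec_yaml_escape s out) := by unfold Spec_yaml_escape; infer_instance

-- ===== CLAIM (what is proved, stated in full; the proofs are below) =====
def Claim_equal_yaml_escape : Prop := ∀ (s : String), Dom_yaml_escape s → Spec_yaml_escape s (yaml_escape s)

-- ===== LEMMAS AND PROOFS =====

-- list form of B's per-character escape
def pvEsc (c : Char) : List Char :=
  if c = '\\' then ['\\', '\\'] else if c = '"' then ['\\', '"'] else [c]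

-- replace with a single-character pattern is a flatMap
theorem replace_go_singleton (c0 : Char) (nw : List Char) :
    ∀ (fuel : Nat) (l acc : List Char), l.length ≤ fuel →
      PySem.Chars.replace.go [c0] nw fuel l acc
        = acc.reverse ++ l.flatMap (fun c => if c = c0 then nw else [c]) := by
  intro fuel
  induction fuel with
  | zero =>
    intro l acc h
    have : l = [] := List.eq_nil_of_length_eq_zero (Nat.le_zero.mp h)
    subst this
    simp [PySem.Chars.replace.go]
  | succ n ih =>
    intro l acc h
    cases l with
    | nil => simp [PySem.Chars.replace.go]
    | cons c t =>
      by_cases hc : c = c0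
      · subst hc
        have hpre : List.isPrefixOf [c] (c :: t) = true := by
          simp [List.isPrefixOf]
        simp only [PySem.Chars.replace.go, hpre, if_pos]
        rw [ih _ _ (by simpa using Nat.le_of_succ_le_succ h)]
        simp
      · have hpre : List.isPrefixOf [c0] (c :: t) = false := by
          simp [List.isPrefixOf]
          exact fun hh => absurd hh.symm hc
        simp [PySem.Chars.replace.go, hpre]
        rw [ih _ _ (by simpa using Nat.le_of_succ_le_succ h)]
        simp [hc]

theorem replace_singleton (c0 : Char) (nw l : List Char) :
    PySem.Chars.replace l [c0] nw = l.flatMap (fun c => if c = c0 then nw else [c]) := by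
  simp [PySem.Chars.replace]
  exact replace_go_singleton c0 nw l.length l [] (le_refl _)

theorem double_replace (l : List Char) :
    PySem.Chars.replace (PySem.Chars.replace l ['\\'] ['\\', '\\']) ['"'] ['\\', '"']
      = l.flatMap pvEsc := by
  rw [replace_singleton, replace_singleton]
  induction l with
  | nil => simp
  | cons c t ih =>
    simp only [List.flatMap_cons, List.flatMap_append, ih]
    congr 1
    by_cases h1 : c = '\\'
    · subst h1; simp [pvEsc]
    · by_cases h2 : c = '"'
      · subst h2; simp [pvEsc]
      · simp [pvEsc, h1, h2]

-- the B-side fold computed in closed form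
theorem fold_closed (l : List Char) (b : Bool) (acc : List String) :
    l.foldl
      (fun (p : Bool × List String) c =>
        (p.1 || pvSpecial.contains c,
         p.2 ++ [if c = '\\' then "\\\\" else if c = '"' then "\\\"" else String.ofList [c]]))
      (b, acc)
    = (b || l.any (fun c => pvSpecial.contains c),
       acc ++ l.map (fun c => if c = '\\' then "\\\\" else if c = '"' then "\\\"" else String.ofList [c])) := by
  induction l generalizing b acc with
  | nil => simp
  | cons c t ih =>
    simp only [List.foldl_cons, ih, List.any_cons, List.map_cons]
    simp [Bool.or_assoc]

-- "".join of the mapped pieces is the flatMap of pvEsc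
theorem join_pieces (l : List Char) :
    (PySem.Str.join "" (l.map (fun c => if c = '\\' then "\\\\" else if c = '"' then "\\\"" else String.ofList [c]))).toList
      = l.flatMap pvEsc := by
  have hnil : ("" : String).toList = [] := by decide
  have h : ∀ (ps : List (List Char)), List.intercalate ([] : List Char) ps = ps.flatten := by
    intro ps
    induction ps with
    | nil => simp [List.intercalate]
    | cons p ps ih =>
      cases ps with
      | nil => simp [List.intercalate]
      | cons q qs =>
        simp [List.intercalate, List.intersperse] at ih ⊢
        exact ih
  simp only [PySem.Str.join, String.toList_ofList, PySem.Chars.join, hnil, h, List.map_map]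
  induction l with
  | nil => simp
  | cons c t ih =>
    simp only [List.map_cons, List.flatten_cons, List.flatMap_cons, ih]
    congr 1
    by_cases h1 : c = '\\'
    · subst h1; simp [pvEsc]
    · by_cases h2 : c = '"'
      · subst h2; simp [pvEsc]
      · simp [pvEsc, h1, h2]

theorem singleton_infix_iff (c : Char) (l : List Char) : [c] <:+: l ↔ c ∈ l := by
  constructor
  · intro h; exact (List.singleton_sublist).mp h.sublist
  · intro h
    obtain ⟨l1, l2, rfl⟩ := List.append_of_mem h
    exact ⟨l1, l2, by simp⟩

-- special-character detection: scanning the special list equals scanning s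
theorem special_comm (s : List Char) :
    (pvSpecial.any (fun c => PySem.Chars.isIn [c] s))
      = s.any (fun c => pvSpecial.contains c) := by
  rw [Bool.eq_iff_iff]
  simp only [List.any_eq_true, PySem.Chars.isIn_iff_infix, singleton_infix_iff, List.contains_eq_mem,
    decide_eq_true_eq]
  constructor
  · rintro ⟨c, hc, hm⟩; exact ⟨c, hm, hc⟩
  · rintro ⟨c, hc, hm⟩; exact ⟨c, hm, hc⟩

theorem escaped_strings_eq (s : String) :
    PySem.Str.replace (PySem.Str.replace s "\\" "\\\\") "\"" "\\\""
      = PySem.Str.join "" (s.toList.map (fun c => if c = '\\' then "\\\\" else if c = '"' then "\\\"" else String.ofList [c])) := by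
  rw [← String.toList_inj]
  rw [join_pieces]
  rw [PySem.Str.toList_replace, PySem.Str.toList_replace]
  have h1 : ("\\" : String).toList = ['\\'] := by decide
  have h2 : ("\\\\" : String).toList = ['\\', '\\'] := by decide
  have h3 : ("\"" : String).toList = ['"'] := by decide
  have h4 : ("\\\"" : String).toList = ['\\', '"'] := by decide
  rw [h1, h2, h3, h4, double_replace]

-- A's startswith/endswith test equals B's first/last-character test on nonempty strings
theorem last_suffix (l : List Char) : ([' '].isSuffixOf l) = (l.getLast? == some ' ') := by
  simp only [List.isSuffixOf]
  cases hr : l.reverse with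
  | nil =>
    have : l = [] := by simpa using congrArg List.reverse hr
    subst this; simp
  | cons c t =>
    have : l.getLast? = some c := by
      rw [← List.head?_reverse, hr]; rfl
    simp [List.isPrefixOf, this, BEq.comm]

theorem tail_cond (s : String) (h : s.toList ≠ []) :
    (PySem.Str.startswith s " " || PySem.Str.startswith s "-" || PySem.Str.endswith s " ")
      = (((PySem.Str.pyGet? s 0).elim false (fun c => (" -".toList).contains c))
          || ((PySem.Str.pyGet? s (-1)).elim false (fun c => c == ' '))) := by
  obtain ⟨c, t, hct⟩ := List.exists_cons_of_ne_nil h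
  have h0 : PySem.Str.pyGet? s 0 = some c := by
    have hl : 0 < s.length := by
      rw [← String.length_toList]
      exact List.length_pos_iff.mpr h
    simp [PySem.Str.pyGet?, PySem.Chars.pyGet?_eq_listPyGet?, PySem.List.pyGet?, PySem.List.pyIdx?, hct]
  have hlast : PySem.Str.pyGet? s (-1) = s.toList.getLast? := by
    have hl : 1 ≤ s.length := by
      rw [← String.length_toList]
      exact List.length_pos_iff.mpr h
    simp [PySem.Str.pyGet?, PySem.Chars.pyGet?_eq_listPyGet?, PySem.List.pyGet?, PySem.List.pyIdx?, hl,
      List.getLast?_eq_getElem?, String.length_toList]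
  have hpre1 : PySem.Str.startswith s " " = (c == ' ') := by
    simp only [PySem.Str.startswith, PySem.Chars.startswith, hct]
    have : (" " : String).toList = [' '] := by decide
    simp [this, List.isPrefixOf, BEq.comm]
  have hpre2 : PySem.Str.startswith s "-" = (c == '-') := by
    simp only [PySem.Str.startswith, PySem.Chars.startswith, hct]
    have : ("-" : String).toList = ['-'] := by decide
    simp [this, List.isPrefixOf, BEq.comm]
  have hsuf : PySem.Str.endswith s " " = (s.toList.getLast? == some ' ') := by
    simp only [PySem.Str.endswith]
    have : (" " : String).toList = [' '] := by decide
    rw [this]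
    exact last_suffix s.toList
  rw [hpre1, hpre2, hsuf, h0, hlast]
  cases hg : s.toList.getLast? with
  | none => simp [hct] at hg
  | some d =>
    by_cases hc1 : c = ' ' <;> by_cases hc2 : c = '-' <;> by_cases hd : d = ' ' <;>
      simp [hc1, hc2, hd]

-- ===== VERDICT (by name: the statement is the Claim_ definition above) =====
theorem yaml_escape_spec : Claim_equal_yaml_escape := by
  intro s _
  unfold Spec_yaml_escape yaml_escape yaml_escape_alt
  by_cases hs : s = ""
  · simp [hs]
  · simp only [hs, if_false]
    rw [fold_closed]
    have hcond : ((":{}[]&*#?|->!%@`,\"'\\".toList).any (fun c => PySem.Str.isIn (String.ofList [c]) s))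
        = (false || s.toList.any (fun c => pvSpecial.contains c)) := by
      rw [Bool.false_or, ← special_comm]
      simp [PySem.Str.isIn_eq, pvSpecial]
    rw [← hcond]
    by_cases hc : ((":{}[]&*#?|->!%@`,\"'\\".toList).any (fun c => PySem.Str.isIn (String.ofList [c]) s)) = true
    · simp only [hc, if_true]
      rw [escaped_strings_eq, List.nil_append]
    · simp only [Bool.not_eq_true] at hc
      simp only [hc, Bool.false_eq_true, if_false]
      rw [tail_cond s (by simpa using hs)]
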